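-- pv_equiv track=rewrite | github.com/Vlastvyi/nt-performance-lab | task1/task1.py | compute_intervals_and_path
-- ===== SOURCE A (Python) =====
-- def compute_intervals_and_path(n: int, m: int):
--     if n <= 0 or m <= 0:
--         raise ValueError("n и m должны быть положительными числами")
--     intervals = []
--     path = []
--     s = 1
--     while True:
--         path.append(s)
--         # Строим интервал длиной m
--         interval = []
--         for i in range(m):
--             interval.append(((s - 1 + i) % n) + 1)
--         intervals.append(interval)
--         e = interval[-1]  # конец интервала
--         if e == 1:
--             break
--         s = e
--     return intervals, path
-- ===== SOURCE B (Python) =====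
-- def _gcd(a, b):
--     # Euclid's algorithm (A imports no modules, so no math.gcd).
--     return a if b == 0 else _gcd(b, a % b)
--
--
-- def compute_intervals_and_path(n: int, m: int):
--     if n <= 0 or m <= 0:
--         raise ValueError("n и m должны быть положительными числами")
--     # Closed form: in 0-based terms the start values are k*(m-1) mod n and the
--     # walk first returns to 0 after exactly n // gcd(n, m-1) steps, so no
--     # chain traversal is needed at all.
--     d = m - 1
--     length = n // _gcd(n, d)
--     path = [(k * d) % n + 1 for k in range(length)]
--     intervals = [[(st - 1 + i) % n + 1 for i in range(m)] for st in path]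
--     return intervals, path
-- ===== Notes on version B (the rewrite author's own statement) =====
-- stated objective: alternative
-- what changed: Replaces A's while-loop chain traversal (follow e=(s+m-2)%n+1 until it returns to 1) by a number-theoretic closed form: the 0-based starts are k*(m-1) mod n and the walk returns to 1 after exactly n // gcd(n, m-1) steps, so B computes the path length with Euclid's gcd and builds path and intervals directly by comprehension.
import Mathlib
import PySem

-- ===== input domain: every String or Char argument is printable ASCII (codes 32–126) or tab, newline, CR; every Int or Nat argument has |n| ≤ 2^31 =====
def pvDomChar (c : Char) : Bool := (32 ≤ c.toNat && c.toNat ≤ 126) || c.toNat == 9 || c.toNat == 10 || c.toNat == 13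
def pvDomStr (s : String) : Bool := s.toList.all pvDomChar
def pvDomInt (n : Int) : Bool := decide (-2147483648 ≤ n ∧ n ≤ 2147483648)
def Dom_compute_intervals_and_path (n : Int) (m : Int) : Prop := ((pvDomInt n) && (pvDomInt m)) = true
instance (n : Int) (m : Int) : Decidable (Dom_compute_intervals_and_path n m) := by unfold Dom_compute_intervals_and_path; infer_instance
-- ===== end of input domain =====

-- B replaces A's chain-following while-loop by a closed form: the path has exactly
-- n // gcd(n, m-1) starts k*(m-1) mod n, built directly by comprehension (alternative algorithm).


-- ===== PORT A =====
-- A's while-True loop; fuel = n.toNat + 1 bounds the iteration count (the chain of starts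
-- revisits 1 within at most n steps), so the fuel-exhaustion branch is never taken on Pre_.
def pvALoop (n m : Int) : Nat → Int → List (List Int) → List Int → List (List Int) × List Int
  | 0, _, ivs, p => (ivs, p)
  | fuel+1, s, ivs, p =>
    let p' := p ++ [s]
    let interval := (PySem.List.pyRange 0 m 1).foldl
      (fun acc i => acc ++ [PySem.Int.mod (s - 1 + i) n + 1]) []
    let ivs' := ivs ++ [interval]
    match PySem.List.pyGet? interval (-1) with
    | none => (ivs', p')   -- IndexError needs m ≤ 0, excluded by A's guard (outside Pre_)
    | some e => if e = 1 then (ivs', p') else pvALoop n m fuel e ivs' p'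

def compute_intervals_and_path (n : Int) (m : Int) : List (List Int) × List Int :=
  pvALoop n m (n.toNat + 1) 1 [] []

-- ===== PORT B =====
-- Source B's _gcd: Euclid's recursion; fuel makes it total (depth ≤ b.toNat + 2 for the calls
-- made under Pre_, so the fuel-exhaustion branch is never taken there).
def pvGcd : Nat → Int → Int → Int
  | 0, a, _ => a
  | fuel+1, a, b => if b = 0 then a else pvGcd fuel b (PySem.Int.mod a b)

def compute_intervals_and_path_alt (n : Int) (m : Int) : List (List Int) × List Int :=
  let d := m - 1
  let length := PySem.Int.floordiv n (pvGcd (d.toNat + 2) n d)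
  let path := (PySem.List.pyRange 0 length 1).map (fun k => PySem.Int.mod (k * d) n + 1)
  let intervals := path.map (fun st =>
    (PySem.List.pyRange 0 m 1).map (fun i => PySem.Int.mod (st - 1 + i) n + 1))
  (intervals, path)

-- ===== PRECONDITION & SPEC =====
-- Pre_: exactly the inputs where A does not raise ValueError (n ≤ 0 or m ≤ 0 raises).
def Pre_compute_intervals_and_path (n : Int) (m : Int) : Prop := 0 < n ∧ 0 < m
instance (n : Int) (m : Int) : Decidable (Pre_compute_intervals_and_path n m) := by
  unfold Pre_compute_intervals_and_path; infer_instance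

def pvWitness_compute_intervals_and_path : Int × Int := (5, 3)

def Spec_compute_intervals_and_path (n : Int) (m : Int) (out : List (List Int) × List Int) : Prop := out = compute_intervals_and_path_alt n m
instance (n : Int) (m : Int) (out : List (List Int) × List Int) : Decidable (Spec_compute_intervals_and_path n m out) := by unfold Spec_compute_intervals_and_path; infer_instance

-- ===== CLAIM (what is proved, stated in full; the proofs are below) =====
def Claim_equal_compute_intervals_and_path : Prop := ∀ (n : Int) (m : Int), Dom_compute_intervals_and_path n m → Pre_compute_intervals_and_path n m → Spec_compute_intervals_and_path n m (compute_intervals_and_path n m)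

-- ===== LEMMAS AND PROOFS =====

-- Abbreviations used only by the proofs.
def pvStart (n m : Int) (k : Nat) : Int := (((k * (m-1).toNat) % n.toNat : Nat) : Int) + 1
def pvIv (n m st : Int) : List Int :=
  (PySem.List.pyRange 0 m 1).map (fun i => PySem.Int.mod (st - 1 + i) n + 1)
def pvL (n m : Int) : Nat := n.toNat / Nat.gcd n.toNat (m-1).toNat

-- Euclid's fueled recursion computes Nat.gcd on nonnegative arguments with enough fuel.
theorem pv_gcd_eq : ∀ (fuel : Nat) (a b : Int), 0 ≤ a → 0 ≤ b →
    b.toNat + 1 ≤ fuel → pvGcd fuel a b = (Nat.gcd a.toNat b.toNat : Int) := by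
  intro fuel
  induction fuel with
  | zero => intro a b _ _ h; omega
  | succ f ih =>
    intro a b ha hb hf
    by_cases h0 : b = 0
    · simp [pvGcd, h0, Int.toNat_of_nonneg ha]
    · have hbpos : 0 < b := lt_of_le_of_ne hb (Ne.symm h0)
      have hmod : PySem.Int.mod a b = a % b := PySem.Int.mod_eq_emod_of_pos hbpos
      have hlt : a % b < b := Int.emod_lt_of_pos a hbpos
      have hnn : 0 ≤ a % b := Int.emod_nonneg a h0
      have hlt2 : (a % b).toNat < b.toNat := by omega
      have hble : b.toNat ≤ f := by omega
      simp only [pvGcd, h0, if_false, hmod]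
      rw [ih b (a % b) hb hnn (Nat.succ_le_of_lt (lt_of_lt_of_le hlt2 hble))]
      have hab : a % b = ((a.toNat % b.toNat : Nat) : Int) := by
        conv_lhs => rw [show a = ((a.toNat : Nat) : Int) from by omega,
                        show b = ((b.toNat : Nat) : Int) from by omega]
        exact_mod_cast rfl
      have ht : (a % b).toNat = a.toNat % b.toNat := by rw [hab, Int.toNat_natCast]
      rw [ht, Nat.gcd_comm b.toNat, ← Nat.gcd_rec, Nat.gcd_comm]

-- N ∣ k*D ↔ (N / gcd N D) ∣ k.
theorem pv_dvd_iff (N D : Nat) (hN : 0 < N) (k : Nat) :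
    N ∣ k * D ↔ (N / Nat.gcd N D) ∣ k := by
  set g := Nat.gcd N D with hg
  have hgpos : 0 < g := Nat.gcd_pos_of_pos_left D hN
  have hgN : g ∣ N := Nat.gcd_dvd_left N D
  have hgD : g ∣ D := Nat.gcd_dvd_right N D
  have hL : N = g * (N / g) := (Nat.mul_div_cancel' hgN).symm
  have hD : D = g * (D / g) := (Nat.mul_div_cancel' hgD).symm
  have hcop : Nat.Coprime (N / g) (D / g) := Nat.coprime_div_gcd_div_gcd hgpos
  constructor
  · intro h
    have hkD : k * D = g * (k * (D / g)) := by nth_rewrite 1 [hD]; ring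
    have h2 : N ∣ g * (k * (D / g)) := hkD ▸ h
    rw [hL] at h2
    have h3 : N / g ∣ k * (D / g) := (Nat.mul_dvd_mul_iff_left hgpos).mp h2
    exact hcop.dvd_of_dvd_mul_right h3
  · intro ⟨t, ht⟩
    refine ⟨t * (D / g), ?_⟩
    calc k * D = (N / g * t) * (g * (D / g)) := by rw [← ht, ← hD]
      _ = (g * (N / g)) * (t * (D / g)) := by ring
      _ = N * (t * (D / g)) := by rw [← hL]

-- (k*D) % N = 0 ↔ pvL ∣ k, phrased on the Int inputs.
theorem pv_mod_zero_iff (n m : Int) (hn : 0 < n) (k : Nat) :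
    (k * (m-1).toNat) % n.toNat = 0 ↔ pvL n m ∣ k := by
  have hN : 0 < n.toNat := by omega
  have h := pv_dvd_iff n.toNat (m-1).toNat hN k
  constructor
  · intro h0; exact h.mp (Nat.dvd_of_mod_eq_zero h0)
  · intro hL
    obtain ⟨t, ht⟩ := h.mpr hL
    rw [ht]
    exact Nat.mul_mod_right _ _

theorem pv_L_pos (n m : Int) (hn : 0 < n) : 0 < pvL n m := by
  have hN : 0 < n.toNat := by omega
  have hgpos : 0 < Nat.gcd n.toNat (m-1).toNat := Nat.gcd_pos_of_pos_left _ hN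
  exact Nat.div_pos (Nat.le_of_dvd hN (Nat.gcd_dvd_left _ _)) hgpos

-- A's inner for-loop (foldl with append) builds pvIv.
theorem pv_foldl_iv (n m s : Int) :
    (PySem.List.pyRange 0 m 1).foldl
      (fun acc i => acc ++ [PySem.Int.mod (s - 1 + i) n + 1]) [] = pvIv n m s := by
  unfold pvIv
  generalize PySem.List.pyRange 0 m 1 = l
  suffices h : ∀ acc, l.foldl (fun a i => a ++ [PySem.Int.mod (s - 1 + i) n + 1]) acc
      = acc ++ l.map (fun i => PySem.Int.mod (s - 1 + i) n + 1) by simpa using h []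
  induction l with
  | nil => simp
  | cons x xs ih => intro acc; simp [List.foldl_cons, ih]

-- The last element of the interval at start pvStart j is pvStart (j+1).
theorem pv_iv_last (n m : Int) (hn : 0 < n) (hm : 0 < m) (j : Nat) :
    PySem.List.pyGet? (pvIv n m (pvStart n m j)) (-1) = some (pvStart n m (j+1)) := by
  have h : PySem.List.pyRange 0 m 1 = PySem.List.pyRange 0 (m - 1) 1 ++ [m - 1] := by
    have := PySem.List.pyRange_one_succ_right (a := 0) (b := m - 1) (by omega)
    simpa using this
  unfold pvIv
  rw [h, List.map_append, List.map_singleton, PySem.List.pyGet?_neg_one_append_singleton]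
  congr 1
  unfold pvStart
  have hcast : ((((j * (m-1).toNat) % n.toNat : Nat) : Int) + 1 - 1 + (m - 1))
      = (((j * (m-1).toNat) % n.toNat + (m-1).toNat : Nat) : Int) := by
    push_cast
    omega
  rw [hcast]
  have hmodc : PySem.Int.mod (((j * (m-1).toNat) % n.toNat + (m-1).toNat : Nat) : Int) n
      = ((((j * (m-1).toNat) % n.toNat + (m-1).toNat) % n.toNat : Nat) : Int) := by
    conv_lhs => rw [show n = (n.toNat : Int) by omega]
    exact PySem.Int.mod_natCast _ _
  rw [hmodc]
  congr 2
  rw [Nat.mod_add_mod]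
  ring_nf

-- pvStart j = 1 iff pvL divides j.
theorem pv_start_eq_one_iff (n m : Int) (hn : 0 < n) (j : Nat) :
    pvStart n m j = 1 ↔ pvL n m ∣ j := by
  unfold pvStart
  rw [← pv_mod_zero_iff n m hn j]
  omega

-- Main invariant: from position j < L with enough fuel, A's loop appends the tail of the
-- closed-form path (and its intervals).
theorem pv_loop_closed (n m : Int) (hn : 0 < n) (hm : 0 < m) :
    ∀ (fuel j : Nat) (ivs : List (List Int)) (p : List Int),
    j < pvL n m → pvL n m - j ≤ fuel →
    pvALoop n m fuel (pvStart n m j) ivs p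
      = (ivs ++ (List.range' j (pvL n m - j)).map (fun k => pvIv n m (pvStart n m k)),
         p ++ (List.range' j (pvL n m - j)).map (pvStart n m)) := by
  intro fuel
  induction fuel with
  | zero => intro j ivs p hj hf; omega
  | succ f ih =>
    intro j ivs p hj hf
    simp only [pvALoop, pv_foldl_iv]
    simp only [pv_iv_last n m hn hm j]
    by_cases hstop : pvL n m ∣ (j + 1)
    · have hjL : j + 1 = pvL n m := by
        obtain ⟨t, ht⟩ := hstop
        have ht1 : 1 ≤ t := by
          rcases Nat.eq_zero_or_pos t with h | h
          · subst h; simp at ht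
          · exact h
        have hge : pvL n m ≤ pvL n m * t := Nat.le_mul_of_pos_right _ ht1
        have h2 : pvL n m ≤ j + 1 := ht ▸ hge
        omega
      simp only [if_pos ((pv_start_eq_one_iff n m hn (j+1)).mpr hstop)]
      have h1 : pvL n m - j = 1 := by omega
      simp [h1]
    · simp only [if_neg (show ¬ pvStart n m (j+1) = 1 from fun h =>
        hstop ((pv_start_eq_one_iff n m hn (j+1)).mp h))]
      have hj1 : j + 1 < pvL n m := by
        have := pv_L_pos n m hn
        rcases Nat.lt_or_ge (j+1) (pvL n m) with h | h
        · exact h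
        · exact absurd ⟨1, by omega⟩ hstop
      rw [ih (j+1) _ _ hj1 (by omega)]
      have hsplit : List.range' j (pvL n m - j) = j :: List.range' (j+1) (pvL n m - (j+1)) := by
        rw [show pvL n m - j = (pvL n m - (j+1)) + 1 by omega, List.range'_succ]
      rw [hsplit]
      simp

-- B's port computes the closed form stated with pvL / pvStart / pvIv.
theorem pv_start_eq (n m : Int) (hn : 0 < n) (hm : 0 < m) (k : Nat) :
    PySem.Int.mod ((k : Int) * (m - 1)) n + 1 = pvStart n m k := by
  have h1 : (((m-1).toNat : Nat) : Int) = m - 1 := by omega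
  have hcast : (k : Int) * (m - 1) = ((k * (m-1).toNat : Nat) : Int) := by
    rw [Nat.cast_mul, h1]
  have hmod : PySem.Int.mod ((k : Int) * (m - 1)) n
      = (((k * (m-1).toNat) % n.toNat : Nat) : Int) := by
    rw [hcast]
    conv_lhs => rw [show n = (n.toNat : Int) by omega]
    exact PySem.Int.mod_natCast _ _
  rw [hmod]; rfl

theorem pv_alt_closed (n m : Int) (hn : 0 < n) (hm : 0 < m) :
    compute_intervals_and_path_alt n m
      = ((List.range (pvL n m)).map (fun k => pvIv n m (pvStart n m k)),
         (List.range (pvL n m)).map (pvStart n m)) := by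
  unfold compute_intervals_and_path_alt
  have hd : 0 ≤ m - 1 := by omega
  have hgcd : pvGcd ((m-1).toNat + 2) n (m - 1) = (Nat.gcd n.toNat (m-1).toNat : Int) :=
    pv_gcd_eq _ n (m-1) (by omega) hd (by omega)
  have hfd : PySem.Int.floordiv n (Nat.gcd n.toNat (m-1).toNat : Int) = (pvL n m : Int) := by
    conv_lhs => rw [show n = (n.toNat : Int) by omega]
    exact PySem.Int.floordiv_natCast _ _
  simp only [hgcd, hfd]
  have hrange : PySem.List.pyRange 0 (pvL n m : Int) 1
      = (List.range (pvL n m)).map (Nat.cast : Nat → Int) := by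
    rw [PySem.List.pyRange_one]
    simp only [sub_zero, Int.toNat_natCast]
    exact List.map_congr_left (fun k _ => by omega)
  rw [hrange, List.map_map, List.map_map, List.map_map]
  simp only [Prod.mk.injEq]
  constructor
  · apply List.map_congr_left
    intro k _
    simp only [Function.comp]
    rw [pv_start_eq n m hn hm k]
    rfl
  · apply List.map_congr_left
    intro k _
    simp only [Function.comp]
    exact pv_start_eq n m hn hm k

-- ===== VERDICT (by name: the statement is the Claim_ definition above) =====
theorem compute_intervals_and_path_spec : Claim_equal_compute_intervals_and_path := by
  intro n m _ hpre
  obtain ⟨hn, hm⟩ := hpre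
  unfold Spec_compute_intervals_and_path compute_intervals_and_path
  have h1 : (1 : Int) = pvStart n m 0 := by
    unfold pvStart
    simp
  rw [h1, pv_loop_closed n m hn hm (n.toNat + 1) 0 [] []
      (pv_L_pos n m hn)
      (by
        have : pvL n m ≤ n.toNat := Nat.div_le_self _ _
        omega),
    pv_alt_closed n m hn hm]
  simp [List.range_eq_range']
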